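-- pv_equiv track=rewrite | github.com/xSistted/Object-Oriented-Programming | Lab/Lab1/3.py | park_rate
-- ===== SOURCE A (Python) =====
-- import math
--
-- def park_rate(time):
--     summ = 0
--     if(time <= 15*60):
--         return 0
--     elif(time <= 6*3600):
--         for i in range(0, 2):
--             if(time >= 0):
--                 if(time <= 3*3600):
--                     return summ + (10*math.ceil(time/3600))
--                 else:
--                     summ += (20*math.ceil((time-3*3600)/3600))
--                     time = time-(time-3*3600)
--             else:
--                 break
--     elif(time > 6*3600):
--         return 200
--     else:
--         return 1
-- ===== SOURCE B (Python) =====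
-- def park_rate(time):
--     # Accumulate the fee hour by hour from a rate schedule (10/h for the first
--     # three hours, 20/h after), instead of closed-form branch arithmetic.
--     if time <= 15 * 60:
--         return 0
--     hours = -(-time // 3600)          # ceiling of time/3600
--     if hours > 6:
--         return 200
--     fee = 0
--     for k in range(hours):
--         fee += 10 if k < 3 else 20
--     return fee
-- ===== Notes on version B (the rewrite author's own statement) =====
-- stated objective: alternative
-- what changed: Replaces A's accumulator loop over two passes and float math.ceil by computing the ceiled hour count once and summing an hourly rate schedule (10/h for hours 1-3, 20/h after) over range(hours).
import Mathlib
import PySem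

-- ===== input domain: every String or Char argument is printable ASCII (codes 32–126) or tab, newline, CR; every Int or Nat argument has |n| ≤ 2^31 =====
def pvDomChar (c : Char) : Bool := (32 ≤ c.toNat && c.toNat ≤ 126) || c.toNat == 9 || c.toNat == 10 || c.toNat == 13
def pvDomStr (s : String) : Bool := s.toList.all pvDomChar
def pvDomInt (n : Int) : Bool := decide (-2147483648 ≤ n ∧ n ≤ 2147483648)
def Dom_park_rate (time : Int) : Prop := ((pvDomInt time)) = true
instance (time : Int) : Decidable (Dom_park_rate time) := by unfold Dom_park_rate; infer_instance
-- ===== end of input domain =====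

-- B computes the ceiled hour count once and sums an hourly rate schedule over it,
-- replacing A's two-pass accumulator loop (alternative decomposition, same cost).


-- ===== PORT A =====
-- math.ceil(a/3600): ceiling division; exact for |a| ≤ 2^31 (float quotient has
-- relative error < 2^-52, far smaller than the 1/3600 distance to the next integer)
def pvCeil3600 (a : Int) : Int := -(PySem.Int.floordiv (-a) 3600)

-- loop body of 'for i in range(0, 2)'; state = (early return, summ, time, broke)
def pvStepA (st : Option Int × Int × Int × Bool) (_i : Int) : Option Int × Int × Int × Bool :=
  match st with
  | (some r, summ, t, br) => (some r, summ, t, br)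
  | (none, summ, t, br) =>
    if br then (none, summ, t, br)
    else if 0 ≤ t then
      if t ≤ 3 * 3600 then (some (summ + 10 * pvCeil3600 t), summ, t, br)
      else (none, summ + 20 * pvCeil3600 (t - 3 * 3600), t - (t - 3 * 3600), br)
    else (none, summ, t, true)

def park_rate (time : Int) : Int :=
  if time ≤ 15 * 60 then 0
  else if time ≤ 6 * 3600 then
    match ((PySem.List.pyRange 0 2 1).foldl pvStepA (none, 0, time, false)).1 with
    | some r => r
    | none => 0   -- loop fell through (Python would return None); unreachable for integer time in this branch
  else if time > 6 * 3600 then 200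
  else 1

-- ===== PORT B =====
def park_rate_alt (time : Int) : Int :=
  if time ≤ 15 * 60 then 0
  else
    let hours := -(PySem.Int.floordiv (-time) 3600)
    if hours > 6 then 200
    else (PySem.List.pyRange 0 hours 1).foldl
      (fun fee k => fee + (if k < 3 then 10 else 20)) 0

-- ===== PRECONDITION & SPEC =====
def Spec_park_rate (time : Int) (out : Int) : Prop := out = park_rate_alt time
instance (time : Int) (out : Int) : Decidable (Spec_park_rate time out) := by unfold Spec_park_rate; infer_instance

-- ===== CLAIM (what is proved, stated in full; the proofs are below) =====
def Claim_equal_park_rate : Prop := ∀ (time : Int), Dom_park_rate time → Spec_park_rate time (park_rate time)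

-- ===== LEMMAS AND PROOFS =====
-- evaluate B's hour value in a given hour bracket
theorem pv_hours_eq (time q : Int) (h1 : (q - 1) * 3600 < time) (h2 : time ≤ q * 3600) :
    -(PySem.Int.floordiv (-time) 3600) = q :=
  (PySem.Int.neg_floordiv_neg_eq_iff_of_pos (by norm_num)).mpr ⟨h1, h2⟩

-- ===== VERDICT (by name: the statement is the Claim_ definition above) =====
theorem park_rate_spec : Claim_equal_park_rate := by
  intro time _
  unfold Spec_park_rate park_rate park_rate_alt
  have hrng : PySem.List.pyRange 0 2 1 = [0, 1] := by decide
  by_cases h0 : time ≤ 15 * 60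
  · rw [if_pos h0, if_pos h0]
  · rw [if_neg h0, if_neg h0]
    by_cases h6 : time ≤ 6 * 3600
    · rw [if_pos h6, hrng]
      -- bracket the hour count: hours ∈ {1,…,6}
      rcases (show (∃ q : Int, 1 ≤ q ∧ q ≤ 6 ∧ (q - 1) * 3600 < time ∧ time ≤ q * 3600) from by
        have hq := (PySem.Int.neg_floordiv_neg_eq_iff_of_pos
          (a := time) (b := 3600) (q := -(PySem.Int.floordiv (-time) 3600)) (by norm_num)).mp rfl
        exact ⟨-(PySem.Int.floordiv (-time) 3600), by nlinarith [hq.1, hq.2],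
          by nlinarith [hq.1, hq.2], hq.1, hq.2⟩) with ⟨q, hq1, hq6, hlo, hhi⟩
      rw [pv_hours_eq time q hlo hhi]
      have hceil : pvCeil3600 time = q := pv_hours_eq time q hlo hhi
      interval_cases q
      · simp [pvStepA, show (0:Int) ≤ time from by omega, show time ≤ 10800 from by omega,
          hceil, PySem.List.pyRange, List.range_succ]
      · simp [pvStepA, show (0:Int) ≤ time from by omega, show time ≤ 10800 from by omega,
          hceil, PySem.List.pyRange, List.range_succ]
      · simp [pvStepA, show (0:Int) ≤ time from by omega, show time ≤ 10800 from by omega,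
          hceil, PySem.List.pyRange, List.range_succ]
      · have hc2 : pvCeil3600 (time - 10800) = 1 :=
          pv_hours_eq (time - 10800) 1 (by omega) (by omega)
        have hc3 : pvCeil3600 10800 = 3 := by decide
        simp [pvStepA, show (0:Int) ≤ time from by omega, show ¬ time ≤ 10800 from by omega,
          show time - (time - 10800) = 10800 from by ring, hc2, hc3, PySem.List.pyRange, List.range_succ]
      · have hc2 : pvCeil3600 (time - 10800) = 2 :=
          pv_hours_eq (time - 10800) 2 (by omega) (by omega)
        have hc3 : pvCeil3600 10800 = 3 := by decide
        simp [pvStepA, show (0:Int) ≤ time from by omega, show ¬ time ≤ 10800 from by omega,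
          show time - (time - 10800) = 10800 from by ring, hc2, hc3, PySem.List.pyRange, List.range_succ]
      · have hc2 : pvCeil3600 (time - 10800) = 3 :=
          pv_hours_eq (time - 10800) 3 (by omega) (by omega)
        have hc3 : pvCeil3600 10800 = 3 := by decide
        simp [pvStepA, show (0:Int) ≤ time from by omega, show ¬ time ≤ 10800 from by omega,
          show time - (time - 10800) = 10800 from by ring, hc2, hc3, PySem.List.pyRange, List.range_succ]
    · rw [if_neg h6, if_pos (show time > 6 * 3600 from by omega)]
      have hq := (PySem.Int.neg_floordiv_neg_eq_iff_of_pos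
        (a := time) (b := 3600) (q := -(PySem.Int.floordiv (-time) 3600)) (by norm_num)).mp rfl
      rw [if_pos (show -(PySem.Int.floordiv (-time) 3600) > 6 from by nlinarith [hq.1, hq.2])]
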